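-- pv_equiv track=rewrite | github.com/nikisge/lead_enrichmentdemo | Lead_enrich_system/clients/job_scraper.py | _is_generic_email
-- ===== SOURCE A (Python) =====
-- def _is_generic_email(email: str) -> bool:
--     """Check if email is generic (not personal)."""
--     generic_patterns = [
--         'info@', 'kontakt@', 'contact@', 'office@', 'mail@',
--         'bewerbung@', 'jobs@', 'karriere@', 'career@', 'hr@',
--         'personal@', 'recruiting@', 'service@', 'support@',
--         'hello@', 'team@', 'admin@', 'webmaster@', 'noreply@'
--     ]
--     return any(email.startswith(p) for p in generic_patterns)
-- ===== SOURCE B (Python) =====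
-- _GENERIC_LOCALS = frozenset({
--     'info', 'kontakt', 'contact', 'office', 'mail',
--     'bewerbung', 'jobs', 'karriere', 'career', 'hr',
--     'personal', 'recruiting', 'service', 'support',
--     'hello', 'team', 'admin', 'webmaster', 'noreply'
-- })
--
--
-- def _is_generic_email(email: str) -> bool:
--     """Check if email is generic (not personal)."""
--     local, sep, _ = email.partition('@')
--     return sep == '@' and local in _GENERIC_LOCALS
-- ===== Notes on version B (the rewrite author's own statement) =====
-- stated objective: idiomatic
-- what changed: Instead of scanning all 19 generic prefixes with startswith, B partitions the email once at the first at-sign and does a single hashed membership test of the local part in a frozenset of the names.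
import Mathlib
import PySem

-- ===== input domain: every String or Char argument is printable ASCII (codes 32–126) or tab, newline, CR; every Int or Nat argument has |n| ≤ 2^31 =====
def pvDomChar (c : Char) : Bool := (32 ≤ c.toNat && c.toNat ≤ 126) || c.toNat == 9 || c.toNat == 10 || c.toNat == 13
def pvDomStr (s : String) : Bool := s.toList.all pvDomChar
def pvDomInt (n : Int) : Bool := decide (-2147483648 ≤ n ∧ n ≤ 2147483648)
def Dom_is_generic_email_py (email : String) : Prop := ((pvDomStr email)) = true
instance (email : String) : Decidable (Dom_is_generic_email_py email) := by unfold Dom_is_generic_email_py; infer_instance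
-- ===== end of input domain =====

-- B replaces A's scan over 19 'name@' prefixes by one partition at the first '@'
-- plus a single set-membership test of the local part (idiomatic; same cost class).

-- ===== PORT A =====
def genericPatterns : List String :=
  ["info@", "kontakt@", "contact@", "office@", "mail@",
   "bewerbung@", "jobs@", "karriere@", "career@", "hr@",
   "personal@", "recruiting@", "service@", "support@",
   "hello@", "team@", "admin@", "webmaster@", "noreply@"]

def is_generic_email_py (email : String) : Bool :=
  genericPatterns.any (fun p => PySem.Str.startswith email p)

-- ===== PORT B =====
-- the frozenset of local-part names (as code-point lists)
def genericLocals : PySem.Set (List Char) :=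
  PySem.Set.ofList
    ["info".toList, "kontakt".toList, "contact".toList, "office".toList, "mail".toList,
     "bewerbung".toList, "jobs".toList, "karriere".toList, "career".toList, "hr".toList,
     "personal".toList, "recruiting".toList, "service".toList, "support".toList,
     "hello".toList, "team".toList, "admin".toList, "webmaster".toList, "noreply".toList]

-- email.partition('@'): local = chars before the first '@'; sep == '@' iff '@' occurs
def is_generic_email_py_alt (email : String) : Bool :=
  let l := email.toList
  l.contains '@' && PySem.Set.contains genericLocals (l.takeWhile (· != '@'))

-- ===== PRECONDITION & SPEC =====
def Spec_is_generic_email_py (email : String) (out : Bool) : Prop := out = is_generic_email_py_alt email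
instance (email : String) (out : Bool) : Decidable (Spec_is_generic_email_py email out) := by unfold Spec_is_generic_email_py; infer_instance

-- ===== CLAIM (what is proved, stated in full; the proofs are below) =====
def Claim_equal_is_generic_email_py : Prop := ∀ (email : String), Dom_is_generic_email_py email → Spec_is_generic_email_py email (is_generic_email_py email)

-- ===== LEMMAS AND PROOFS =====

-- 'name@' is a prefix of l  ↔  l has an '@' and the part before the first '@' is name
lemma prefix_at (name : List Char) (h : '@' ∉ name) (l : List Char) :
    (name ++ ['@']) <+: l ↔ l.takeWhile (· != '@') = name ∧ '@' ∈ l := by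
  induction name generalizing l with
  | nil =>
    cases l with
    | nil => simp
    | cons c t =>
      by_cases hc : c = '@'
      · simp [hc, List.cons_prefix_cons]
      · simp [hc, List.cons_prefix_cons]
        exact fun h => hc h.symm
  | cons a ns ih =>
    have ha : a ≠ '@' := fun e => h (e ▸ List.mem_cons_self)
    have h' : '@' ∉ ns := fun m => h (List.mem_cons_of_mem _ m)
    cases l with
    | nil => simp
    | cons c t =>
      by_cases hc : c = '@'
      · subst hc
        simp [List.cons_prefix_cons, ha]
      · rw [List.cons_append, List.cons_prefix_cons]
        constructor
        · rintro ⟨rfl, hp⟩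
          obtain ⟨htw, hm⟩ := (ih h' t).mp hp
          refine ⟨?_, List.mem_cons_of_mem _ hm⟩
          rw [List.takeWhile_cons, if_pos (by simp [hc]), htw]
        · rintro ⟨htw, hm⟩
          rw [List.takeWhile_cons, if_pos (by simp [hc])] at htw
          obtain ⟨rfl, htw'⟩ := List.cons_eq_cons.mp htw
          refine ⟨rfl, (ih h' t).mpr ⟨htw', ?_⟩⟩
          cases List.mem_cons.mp hm with
          | inl h0 => exact absurd h0.symm hc
          | inr h0 => exact h0

lemma startsAt (l : List Char) (name : List Char) (h : '@' ∉ name) :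
    decide ((name ++ ['@']) <+: l)
      = (l.contains '@' && decide (l.takeWhile (· != '@') = name)) := by
  rw [Bool.eq_iff_iff]
  simp [prefix_at name h l, and_comm]

lemma any_names (names : List (List Char)) (l : List Char) (h : ∀ n ∈ names, '@' ∉ n) :
    (names.map (fun n => n ++ ['@'])).any (fun p => decide (p <+: l))
      = (l.contains '@' && names.contains (l.takeWhile (· != '@'))) := by
  induction names with
  | nil => simp
  | cons n ns ih =>
    simp only [List.map_cons, List.any_cons, List.contains_cons]
    rw [startsAt l n (h n List.mem_cons_self), ih (fun m hm => h m (List.mem_cons_of_mem _ hm))]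
    cases hc : l.contains '@' <;> (rw [Bool.eq_iff_iff]; simp)

lemma sw_eq (s p : String) :
    PySem.Str.startswith s p = decide (p.toList <+: s.toList) := by
  rw [Bool.eq_iff_iff]
  simp [PySem.Chars.startswith_iff]

-- ===== VERDICT (by name: the statement is the Claim_ definition above) =====
theorem is_generic_email_py_spec : Claim_equal_is_generic_email_py := by
  intro email _
  unfold Spec_is_generic_email_py is_generic_email_py is_generic_email_py_alt
  simp only [sw_eq]
  have hmap : genericPatterns.map String.toList
      = (["info".toList, "kontakt".toList, "contact".toList, "office".toList, "mail".toList,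
          "bewerbung".toList, "jobs".toList, "karriere".toList, "career".toList, "hr".toList,
          "personal".toList, "recruiting".toList, "service".toList, "support".toList,
          "hello".toList, "team".toList, "admin".toList, "webmaster".toList,
          "noreply".toList]).map (fun n => n ++ ['@']) := by decide
  have h1 : genericPatterns.any (fun p => decide (p.toList <+: email.toList))
      = (genericPatterns.map String.toList).any (fun q => decide (q <+: email.toList)) := by
    rw [List.any_map]; rfl
  rw [h1, hmap, any_names _ _ (by decide)]
  rw [PySem.Set.contains_eq_listContains,
      show (genericLocals : List (List Char))
        = ["info".toList, "kontakt".toList, "contact".toList, "office".toList, "mail".toList,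
           "bewerbung".toList, "jobs".toList, "karriere".toList, "career".toList, "hr".toList,
           "personal".toList, "recruiting".toList, "service".toList, "support".toList,
           "hello".toList, "team".toList, "admin".toList, "webmaster".toList,
           "noreply".toList] from by decide]
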